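-- pv_equiv track=rewrite | github.com/coolka1234/Self-Playing-Clobber | src/heuristics.py | isolation_score
-- ===== SOURCE A (Python) =====
-- def isolation_score(board, player):
--     opponent = 'B' if player == 'W' else 'W'
--
--     def is_isolated(x, y):
--         for dx, dy in [(-1,0), (1,0), (0,-1), (0,1)]:
--             nx, ny = x + dx, y + dy
--             if 0 <= nx < len(board) and 0 <= ny < len(board[0]):
--                 if board[nx][ny] in ('B', 'W'):
--                     return False
--         return True
--
--     def count_isolated(p):
--         count = 0
--         for x in range(len(board)):
--             for y in range(len(board[0])):
--                 if board[x][y] == p and is_isolated(x, y):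
--                     count += 1
--         return count
--
--     return count_isolated(opponent) - count_isolated(player)
-- ===== SOURCE B (Python) =====
-- def isolation_score(board, player):
--     opponent = 'B' if player == 'W' else 'W'
--     h = len(board)
--     w = len(board[0]) if board else 0
--
--     def cell(x, y):
--         if 0 <= x < h and 0 <= y < w:
--             return board[x][y]
--         return ''
--
--     score = 0
--     for x in range(h):
--         for y in range(w):
--             c = board[x][y]
--             if c != opponent and c != player:
--                 continue
--             if any(cell(x + dx, y + dy) in ('B', 'W')
--                    for dx, dy in ((-1, 0), (1, 0), (0, -1), (0, 1))):
--                 continue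
--             score += 1 if c == opponent else -1
--     return score
-- ===== Notes on version B (the rewrite author's own statement) =====
-- stated objective: simpler
-- what changed: Replaces the two separate full-board counting passes by a single pass with one signed accumulator, and replaces the early-return bounds-checked neighbour loop by an any() over a total cell accessor that returns '' out of bounds.
import Mathlib
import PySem

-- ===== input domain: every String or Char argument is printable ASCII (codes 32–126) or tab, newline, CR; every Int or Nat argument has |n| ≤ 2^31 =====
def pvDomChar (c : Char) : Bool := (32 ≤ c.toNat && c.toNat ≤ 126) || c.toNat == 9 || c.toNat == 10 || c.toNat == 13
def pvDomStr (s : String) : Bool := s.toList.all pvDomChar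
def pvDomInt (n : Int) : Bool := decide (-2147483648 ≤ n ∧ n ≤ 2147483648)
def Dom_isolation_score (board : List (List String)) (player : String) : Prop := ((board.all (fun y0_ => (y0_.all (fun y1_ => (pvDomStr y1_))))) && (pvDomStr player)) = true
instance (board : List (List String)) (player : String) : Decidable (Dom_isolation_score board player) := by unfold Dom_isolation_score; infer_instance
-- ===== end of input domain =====

-- B merges A's two separate counting passes into one pass with a single signed
-- accumulator, checking isolation via an any() over a total cell accessor (objective: simpler).

-- ===== PORT A =====
-- board[x][y] (both indices known in range inside Pre_); default "" only reachable outside Pre_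
def pvCell (board : List (List String)) (x y : Int) : String :=
  (PySem.List.pyGet? ((PySem.List.pyGet? board x).getD []) y).getD ""

-- A's is_isolated: for each of the 4 deltas, if in bounds and neighbour is 'B' or 'W', return False
def pvIsIsolated (board : List (List String)) (x y : Int) : Bool :=
  [((-1 : Int), (0 : Int)), (1, 0), (0, -1), (0, 1)].all (fun d =>
    let nx := x + d.1
    let ny := y + d.2
    if 0 ≤ nx ∧ nx < (board.length : Int) ∧ 0 ≤ ny ∧ ny < ((board.headD []).length : Int) then
      !(pvCell board nx ny == "B" || pvCell board nx ny == "W")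
    else true)

-- A's count_isolated(p)
def pvCountIsolated (board : List (List String)) (p : String) : Int :=
  (List.range board.length).foldl (fun (count : Int) (x : Nat) =>
    (List.range (board.headD []).length).foldl (fun (count : Int) (y : Nat) =>
      if pvCell board (x : Int) (y : Int) == p && pvIsIsolated board (x : Int) (y : Int) then count + 1 else count) count) 0

def isolation_score (board : List (List String)) (player : String) : Int :=
  let opponent := if player == "W" then "B" else "W"
  pvCountIsolated board opponent - pvCountIsolated board player

-- ===== PORT B =====
-- B's cell(x, y): total accessor, '' out of bounds; w = len(board[0]) if board else 0 is (board.headD []).length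
def pvCellB (board : List (List String)) (h w : Int) (x y : Int) : String :=
  if 0 ≤ x ∧ x < h ∧ 0 ≤ y ∧ y < w then pvCell board x y else ""

def isolation_score_alt (board : List (List String)) (player : String) : Int :=
  let opponent := if player == "W" then "B" else "W"
  let h : Int := board.length
  let w : Int := (board.headD []).length
  (List.range board.length).foldl (fun (score : Int) (x : Nat) =>
    (List.range (board.headD []).length).foldl (fun (score : Int) (y : Nat) =>
      let c := pvCell board (x : Int) (y : Int)
      if c != opponent && c != player then score
      else if [((-1 : Int), (0 : Int)), (1, 0), (0, -1), (0, 1)].any (fun d =>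
          let v := pvCellB board h w ((x : Int) + d.1) ((y : Int) + d.2)
          v == "B" || v == "W") then score
      else score + (if c == opponent then 1 else -1)) score) 0

-- ===== PRECONDITION & SPEC =====
-- Pre_ excludes exactly the inputs where A raises: ragged boards with a row shorter
-- than row 0 (board[x][y] is an IndexError there).
def Pre_isolation_score (board : List (List String)) (player : String) : Prop :=
  ∀ row ∈ board, (board.headD []).length ≤ row.length
instance (board : List (List String)) (player : String) : Decidable (Pre_isolation_score board player) := by unfold Pre_isolation_score; infer_instance

def pvWitness_isolation_score : List (List String) × String := ([["B", ""], ["", "W"]], "W")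

def Spec_isolation_score (board : List (List String)) (player : String) (out : Int) : Prop := out = isolation_score_alt board player
instance (board : List (List String)) (player : String) (out : Int) : Decidable (Spec_isolation_score board player out) := by unfold Spec_isolation_score; infer_instance

-- ===== CLAIM (what is proved, stated in full; the proofs are below) =====
def Claim_equal_isolation_score : Prop := ∀ (board : List (List String)) (player : String), Dom_isolation_score board player → Pre_isolation_score board player → Spec_isolation_score board player (isolation_score board player)

-- ===== LEMMAS AND PROOFS =====

theorem pv_sum_sub (f g : Nat → Int) (l : List Nat) :
    (l.map f).sum - (l.map g).sum = (l.map (fun (x : Nat) => f x - g x)).sum := by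
  induction l with
  | nil => simp
  | cons x xs ih => simp only [List.map_cons, List.sum_cons, ← ih]; ring

-- each counting fold of A, in sum form (via PySem.List.foldl_add)
theorem pv_count_sum (board : List (List String)) (p : String) :
    pvCountIsolated board p =
      ((List.range board.length).map (fun (x : Nat) =>
        ((List.range (board.headD []).length).map (fun (y : Nat) =>
          if pvCell board (x : Int) (y : Int) == p && pvIsIsolated board (x : Int) (y : Int) then (1 : Int) else 0)).sum)).sum := by
  unfold pvCountIsolated
  have hinner : ∀ x : Nat, (fun (count : Int) (y : Nat) =>
      if pvCell board (x : Int) (y : Int) == p && pvIsIsolated board (x : Int) (y : Int) then count + 1 else count) =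
      (fun (count : Int) (y : Nat) => count + (if pvCell board (x : Int) (y : Int) == p && pvIsIsolated board (x : Int) (y : Int) then (1 : Int) else 0)) := by
    intro x; funext count y; split <;> simp
  have houter : (fun (count : Int) (x : Nat) =>
      (List.range (board.headD []).length).foldl (fun (count : Int) (y : Nat) =>
        if pvCell board (x : Int) (y : Int) == p && pvIsIsolated board (x : Int) (y : Int) then count + 1 else count) count) =
      (fun (count : Int) (x : Nat) => count + ((List.range (board.headD []).length).map (fun (y : Nat) =>
        if pvCell board (x : Int) (y : Int) == p && pvIsIsolated board (x : Int) (y : Int) then (1 : Int) else 0)).sum) := by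
    funext count x
    rw [hinner x, PySem.List.foldl_add]
  rw [houter, PySem.List.foldl_add, zero_add]

-- B's fold, in sum form
theorem pv_alt_sum (board : List (List String)) (opponent player : String) (h w : Int) :
    (List.range board.length).foldl (fun (score : Int) (x : Nat) =>
      (List.range (board.headD []).length).foldl (fun (score : Int) (y : Nat) =>
        let c := pvCell board (x : Int) (y : Int)
        if c != opponent && c != player then score
        else if [((-1 : Int), (0 : Int)), (1, 0), (0, -1), (0, 1)].any (fun d =>
            let v := pvCellB board h w ((x : Int) + d.1) ((y : Int) + d.2)
            v == "B" || v == "W") then score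
        else score + (if c == opponent then 1 else -1)) score) 0 =
    ((List.range board.length).map (fun (x : Nat) =>
      ((List.range (board.headD []).length).map (fun (y : Nat) =>
        if pvCell board (x : Int) (y : Int) != opponent && pvCell board (x : Int) (y : Int) != player then (0 : Int)
        else if [((-1 : Int), (0 : Int)), (1, 0), (0, -1), (0, 1)].any (fun d =>
            let v := pvCellB board h w ((x : Int) + d.1) ((y : Int) + d.2)
            v == "B" || v == "W") then 0
        else (if pvCell board (x : Int) (y : Int) == opponent then 1 else -1))).sum)).sum := by
  have hinner : ∀ x : Nat, (fun (score : Int) (y : Nat) =>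
      let c := pvCell board (x : Int) (y : Int)
      if c != opponent && c != player then score
      else if [((-1 : Int), (0 : Int)), (1, 0), (0, -1), (0, 1)].any (fun d =>
          let v := pvCellB board h w ((x : Int) + d.1) ((y : Int) + d.2)
          v == "B" || v == "W") then score
      else score + (if c == opponent then 1 else -1)) =
      (fun (score : Int) (y : Nat) => score + (
        if pvCell board (x : Int) (y : Int) != opponent && pvCell board (x : Int) (y : Int) != player then (0 : Int)
        else if [((-1 : Int), (0 : Int)), (1, 0), (0, -1), (0, 1)].any (fun d =>
            let v := pvCellB board h w ((x : Int) + d.1) ((y : Int) + d.2)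
            v == "B" || v == "W") then 0
        else (if pvCell board (x : Int) (y : Int) == opponent then 1 else -1))) := by
    intro x; funext score y
    simp only []
    split
    · simp
    · split <;> simp
  have houter : (fun (score : Int) (x : Nat) =>
      (List.range (board.headD []).length).foldl (fun (score : Int) (y : Nat) =>
        let c := pvCell board (x : Int) (y : Int)
        if c != opponent && c != player then score
        else if [((-1 : Int), (0 : Int)), (1, 0), (0, -1), (0, 1)].any (fun d =>
            let v := pvCellB board h w ((x : Int) + d.1) ((y : Int) + d.2)
            v == "B" || v == "W") then score
        else score + (if c == opponent then 1 else -1)) score) =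
      (fun (score : Int) (x : Nat) => score + ((List.range (board.headD []).length).map (fun (y : Nat) =>
        if pvCell board (x : Int) (y : Int) != opponent && pvCell board (x : Int) (y : Int) != player then (0 : Int)
        else if [((-1 : Int), (0 : Int)), (1, 0), (0, -1), (0, 1)].any (fun d =>
            let v := pvCellB board h w ((x : Int) + d.1) ((y : Int) + d.2)
            v == "B" || v == "W") then 0
        else (if pvCell board (x : Int) (y : Int) == opponent then 1 else -1))).sum) := by
    funext score x
    rw [hinner x, PySem.List.foldl_add]
  rw [houter, PySem.List.foldl_add, zero_add]

-- B's neighbour-any is the negation of A's isolation test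
theorem pv_any_eq_not_iso (board : List (List String)) (x y : Int) :
    [((-1 : Int), (0 : Int)), (1, 0), (0, -1), (0, 1)].any (fun d =>
      let v := pvCellB board (board.length : Int) ((board.headD []).length : Int) (x + d.1) (y + d.2)
      v == "B" || v == "W") = !(pvIsIsolated board x y) := by
  simp only [pvIsIsolated, pvCellB, List.any_cons, List.any_nil, List.all_cons, List.all_nil]
  split_ifs <;> simp_all

-- per-cell: opponent contribution minus player contribution equals B's signed contribution
theorem pv_cell_eq (board : List (List String)) (opponent player : String)
    (hop : opponent ≠ player) (x y : Int) :
    (if pvCell board x y == opponent && pvIsIsolated board x y then (1 : Int) else 0) -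
    (if pvCell board x y == player && pvIsIsolated board x y then (1 : Int) else 0) =
    (if pvCell board x y != opponent && pvCell board x y != player then (0 : Int)
     else if [((-1 : Int), (0 : Int)), (1, 0), (0, -1), (0, 1)].any (fun d =>
         let v := pvCellB board (board.length : Int) ((board.headD []).length : Int) (x + d.1) (y + d.2)
         v == "B" || v == "W") then 0
     else (if pvCell board x y == opponent then 1 else -1)) := by
  rw [pv_any_eq_not_iso]
  by_cases h1 : pvCell board x y = opponent <;>
    by_cases h2 : pvCell board x y = player <;>
      cases hiso : pvIsIsolated board x y <;>
        simp_all

-- ===== VERDICT (by name: the statement is the Claim_ definition above) =====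
theorem isolation_score_spec : Claim_equal_isolation_score := by
  intro board player _ _
  unfold Spec_isolation_score isolation_score isolation_score_alt
  simp only []
  have hop : (if player == "W" then "B" else "W") ≠ player := by
    by_cases h : player == "W"
    · simp only [h, if_pos]
      intro hc; rw [← hc] at h; simp at h
    · simp only [h]
      intro hc
      rw [← hc] at h; simp at h
  rw [pv_count_sum, pv_count_sum, pv_alt_sum, pv_sum_sub]
  refine congrArg List.sum (List.map_congr_left ?_)
  intro x _
  rw [pv_sum_sub]
  refine congrArg List.sum (List.map_congr_left ?_)
  intro y _
  exact pv_cell_eq board _ player hop _ _
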